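-- pv_equiv track=rewrite | github.com/Paulo-Rocha-97/Tese_code | Plot_data/Caudal_ecologico.py | complete_for_years
-- ===== SOURCE A (Python) =====
-- def complete_for_years( Caudal_ref, n_year ):
--
--     Caudal = []
--
--     for i in range(n_year):
--
--         for j in range(len(Caudal_ref)):
--
--             if i < (n_year-1):
--
--                 Caudal.append(Caudal_ref[j])
--
--             elif i == (n_year-1) and j <7 :
--
--                 Caudal.append(Caudal_ref[j])
--
--     return Caudal
-- ===== SOURCE B (Python) =====
-- def complete_for_years(Caudal_ref, n_year):
--     if n_year < 1:
--         return []
--     return Caudal_ref * (n_year - 1) + Caudal_ref[:7]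
-- ===== Notes on version B (the rewrite author's own statement) =====
-- stated objective: simpler
-- what changed: Replaces the nested per-element loop with per-i branching by a guard for n_year < 1 plus two bulk list operations: list repetition Caudal_ref*(n_year-1) and the slice Caudal_ref[:7].
import Mathlib
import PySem

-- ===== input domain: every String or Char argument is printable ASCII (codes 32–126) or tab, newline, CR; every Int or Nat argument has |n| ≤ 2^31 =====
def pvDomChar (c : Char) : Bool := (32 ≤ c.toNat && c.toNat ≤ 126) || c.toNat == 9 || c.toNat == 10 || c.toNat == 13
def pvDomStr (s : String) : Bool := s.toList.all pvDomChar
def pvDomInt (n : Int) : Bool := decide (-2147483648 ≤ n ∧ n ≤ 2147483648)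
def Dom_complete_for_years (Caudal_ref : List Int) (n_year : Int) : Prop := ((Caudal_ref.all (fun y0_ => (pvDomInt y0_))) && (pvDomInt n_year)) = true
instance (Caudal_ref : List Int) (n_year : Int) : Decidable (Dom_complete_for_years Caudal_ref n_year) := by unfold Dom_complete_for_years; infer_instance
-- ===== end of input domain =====

-- B replaces the nested per-element loop by a guard plus list repetition and a 7-element slice (simpler decomposition).

-- ===== PORT A =====
def complete_for_years (Caudal_ref : List Int) (n_year : Int) : List Int :=
  (PySem.List.pyRange 0 n_year 1).foldl (fun Caudal i =>
    (PySem.List.pyRange 0 (Caudal_ref.length : Int) 1).foldl (fun Caudal j =>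
      if i < n_year - 1 then Caudal ++ [PySem.List.pyGetD Caudal_ref j 0]
      else if i = n_year - 1 ∧ j < 7 then Caudal ++ [PySem.List.pyGetD Caudal_ref j 0]
      else Caudal) Caudal) []

-- ===== PORT B =====
def complete_for_years_alt (Caudal_ref : List Int) (n_year : Int) : List Int :=
  if n_year < 1 then []
  else (List.replicate (n_year - 1).toNat Caudal_ref).flatten ++ PySem.List.slice Caudal_ref none (some 7)

-- ===== PRECONDITION & SPEC =====
def Spec_complete_for_years (Caudal_ref : List Int) (n_year : Int) (out : List Int) : Prop := out = complete_for_years_alt Caudal_ref n_year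
instance (Caudal_ref : List Int) (n_year : Int) (out : List Int) : Decidable (Spec_complete_for_years Caudal_ref n_year out) := by unfold Spec_complete_for_years; infer_instance

-- ===== CLAIM (what is proved, stated in full; the proofs are below) =====
def Claim_equal_complete_for_years : Prop := ∀ (Caudal_ref : List Int) (n_year : Int), Dom_complete_for_years Caudal_ref n_year → Spec_complete_for_years Caudal_ref n_year (complete_for_years Caudal_ref n_year)

-- ===== LEMMAS AND PROOFS =====

-- the partial-year inner loop: appending the first (at most) 7 elements
theorem pv_loop7 (xs : List Int) : ∀ (k : Nat), k ≤ xs.length → ∀ (acc : List Int),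
    List.foldl (fun C j => if j < (7:Int) then C ++ [PySem.List.pyGetD xs j 0] else C) acc
      (PySem.List.pyRange 0 (k : Int) 1)
    = acc ++ (xs.take k).take 7 := by
  intro k
  induction k with
  | zero => intro _ acc; simp [PySem.List.pyRange_one_eq_nil]
  | succ k ih =>
    intro hk acc
    have hcast : ((k + 1 : Nat) : Int) = (k : Int) + 1 := by push_cast; ring
    rw [hcast, PySem.List.pyRange_one_succ_right (by positivity), List.foldl_append,
      ih (by omega)]
    have hklt : k < xs.length := by omega
    have hget : PySem.List.pyGetD xs (k : Int) 0 = xs[k] := by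
      simp [PySem.List.pyGetD_natCast, List.getD_eq_getElem?_getD, hklt]
    have hlen : (xs.take k).length = k := by simp [Nat.min_eq_left (le_of_lt hklt)]
    have htake : xs.take (k + 1) = xs.take k ++ [xs[k]] := by
      rw [List.take_add_one]; simp [hklt]
    have hsplit : (xs.take (k + 1)).take 7 = (xs.take k).take 7 ++ List.take (7 - k) [xs[k]] := by
      rw [htake, List.take_append, hlen]
    rw [hsplit]
    by_cases h7 : (k : Int) < 7
    · have hk7 : k < 7 := by exact_mod_cast h7
      have h1 : List.take (7 - k) [xs[k]] = [xs[k]] :=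
        List.take_of_length_le (by simp; omega)
      simp only [List.foldl_cons, List.foldl_nil, if_pos h7, hget, h1, List.append_assoc]
    · have hk7 : 7 ≤ k := by omega
      have h0 : List.take (7 - k) [xs[k]] = [] := by
        rw [Nat.sub_eq_zero_of_le hk7]; rfl
      simp only [List.foldl_cons, List.foldl_nil, if_neg h7, h0, List.append_nil]

theorem pv_foldl_id {α β : Type} : ∀ (l : List α) (acc : β),
    List.foldl (fun C _ => C) acc l = acc := by
  intro l
  induction l with
  | nil => intro acc; rfl
  | cons a l ih => intro acc; simp only [List.foldl_cons]; exact ih acc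

-- one iteration of the outer loop, as a block appended to the accumulator
theorem pv_inner (xs : List Int) (n i : Int) (acc : List Int) :
    (PySem.List.pyRange 0 (xs.length : Int) 1).foldl (fun C j =>
      if i < n - 1 then C ++ [PySem.List.pyGetD xs j 0]
      else if i = n - 1 ∧ j < 7 then C ++ [PySem.List.pyGetD xs j 0]
      else C) acc
    = acc ++ (if i < n - 1 then xs else if i = n - 1 then xs.take 7 else []) := by
  by_cases h1 : i < n - 1
  · simp only [if_pos h1]
    rw [PySem.List.foldl_pyRange_zero_pyGetD' xs 0 (fun C x => C ++ [x]) acc,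
      PySem.List.foldl_append_singleton]
  · by_cases h2 : i = n - 1
    · subst h2
      simp only [lt_self_iff_false, if_false, true_and, if_true]
      have h := pv_loop7 xs xs.length le_rfl acc
      simp only [List.take_length] at h
      exact h
    · simp only [if_neg h1, h2, false_and, if_false, List.append_nil]
      exact pv_foldl_id _ acc

theorem pv_flatMap_const (xs : List Int) : ∀ (l : List Int),
    l.flatMap (fun _ => xs) = (List.replicate l.length xs).flatten := by
  intro l; induction l with
  | nil => rfl
  | cons a l ih => simp [List.flatMap_cons, List.replicate_succ, ih]

-- ===== VERDICT (by name: the statement is the Claim_ definition above) =====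
theorem complete_for_years_spec : Claim_equal_complete_for_years := by
  intro xs n _
  unfold Spec_complete_for_years complete_for_years complete_for_years_alt
  have hbody : (fun (C : List Int) (i : Int) =>
      (PySem.List.pyRange 0 (xs.length : Int) 1).foldl (fun C j =>
        if i < n - 1 then C ++ [PySem.List.pyGetD xs j 0]
        else if i = n - 1 ∧ j < 7 then C ++ [PySem.List.pyGetD xs j 0]
        else C) C)
      = (fun C i => C ++ (if i < n - 1 then xs else if i = n - 1 then xs.take 7 else [])) :=
    funext fun C => funext fun i => pv_inner xs n i C
  rw [hbody, PySem.List.foldl_append_eq_flatMap]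
  by_cases hn : n < 1
  · rw [PySem.List.pyRange_one_eq_nil (by omega), if_pos hn]; rfl
  · rw [if_neg hn,
      PySem.List.pyRange_one_append 0 (n - 1) n (by omega) (by omega)]
    have hsing : PySem.List.pyRange (n - 1) n 1 = [n - 1] := by
      have h := PySem.List.pyRange_one_singleton (n - 1)
      rwa [sub_add_cancel] at h
    rw [hsing, List.flatMap_append, List.nil_append]
    congr 1
    · have hmem : ∀ i ∈ PySem.List.pyRange 0 (n - 1) 1,
          (if i < n - 1 then xs else if i = n - 1 then xs.take 7 else []) = xs := by
        intro i hi
        rw [PySem.List.mem_pyRange_one] at hi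
        rw [if_pos hi.2]
      calc (PySem.List.pyRange 0 (n - 1) 1).flatMap
            (fun i => if i < n - 1 then xs else if i = n - 1 then xs.take 7 else [])
          = (PySem.List.pyRange 0 (n - 1) 1).flatMap (fun _ => xs) := by
            simp only [List.flatMap]; rw [List.map_congr_left hmem]
        _ = (List.replicate (PySem.List.pyRange 0 (n - 1) 1).length xs).flatten :=
            pv_flatMap_const xs _
        _ = (List.replicate (n - 1).toNat xs).flatten := by
            rw [PySem.List.length_pyRange_one]; norm_num
    · rw [List.flatMap_cons, List.flatMap_nil, List.append_nil,
        if_neg (lt_irrefl ((n:Int) - 1)), if_pos rfl,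
        PySem.List.slice_to xs (by norm_num : (0:Int) ≤ 7)]
      rfl
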